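-- pv_equiv track=rewrite | github.com/Deniillo/mega-current-test | main/agents/coder_agent.py | parse_agent_diff
-- ===== SOURCE A (Python) =====
-- def parse_agent_diff(agent_response: str) -> dict[str, str]:
--     """
--     Преобразует ответ агента в словарь {путь_файла: новый_код}.
--     Формат ответа:
--     === filename ===
--     <код файла>
--     """
--     files = {}
--     current_file = None
--     buffer = []
--
--     for line in agent_response.splitlines():
--         line = line.rstrip()
--         if line.startswith("===") and line.endswith("==="):
--             if current_file:
--                 files[current_file] = "\n".join(buffer).strip()
--             current_file = line.strip("= ").strip()
--             buffer = []
--         else: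
--             buffer.append(line)
--     if current_file:
--         files[current_file] = "\n".join(buffer).strip()
--     return files
-- ===== SOURCE B (Python) =====
-- def parse_agent_diff(agent_response: str) -> dict[str, str]:
--     lines = [l.rstrip() for l in agent_response.splitlines()]
--     headers = [(i, line.strip("= ").strip())
--                for i, line in enumerate(lines)
--                if line.startswith("===") and line.endswith("===")]
--     bounds = [i for i, _ in headers][1:] + [len(lines)]
--     files = {}
--     for (start, name), end in zip(headers, bounds):
--         if name:
--             files[name] = "\n".join(lines[start + 1:end]).strip()
--     return files
-- ===== Notes on version B (the rewrite author's own statement) =====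
-- stated objective: alternative
-- what changed: Replaces A's single-pass loop that accumulates a line buffer and flushes it at each header/EOF with a two-pass scheme: first index all header lines (position, name), then slice each section's body out of the line list between consecutive headers.
import Mathlib
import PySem

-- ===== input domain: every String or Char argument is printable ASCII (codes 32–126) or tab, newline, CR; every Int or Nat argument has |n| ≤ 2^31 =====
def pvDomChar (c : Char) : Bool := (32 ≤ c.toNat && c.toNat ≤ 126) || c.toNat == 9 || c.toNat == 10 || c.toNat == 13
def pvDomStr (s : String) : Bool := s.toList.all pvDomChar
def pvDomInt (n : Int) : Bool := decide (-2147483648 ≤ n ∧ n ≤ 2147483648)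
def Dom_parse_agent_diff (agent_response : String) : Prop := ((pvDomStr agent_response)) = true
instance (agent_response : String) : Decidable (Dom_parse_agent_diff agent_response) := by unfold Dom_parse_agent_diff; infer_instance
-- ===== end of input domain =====

-- B replaces A's line-by-line buffer accumulation by a two-pass scheme (index the headers, then slice
-- each section out between consecutive headers); same return value, objective: alternative decomposition.

-- shared tiny helpers (the same literal Python expressions occur in both programs)
def pvIsHdr (line : String) : Bool :=
  PySem.Str.startswith line "===" && PySem.Str.endswith line "==="

def pvName (line : String) : String :=
  PySem.Str.strip (PySem.Str.stripChars line "= ")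

def pvFlushNamed (files : PySem.Dict String String) (name : String) (buf : List String) :
    PySem.Dict String String :=
  if name = "" then files
  else files.insert name (PySem.Str.strip (PySem.Str.join "\n" buf))

-- ===== PORT A =====
-- `if current_file: files[current_file] = "\n".join(buffer).strip()` (None and "" are falsy)
def pvFlushA (files : PySem.Dict String String) (cur : Option String) (buf : List String) :
    PySem.Dict String String :=
  match cur with
  | none => files
  | some n => pvFlushNamed files n buf

def pvStepA (st : PySem.Dict String String × Option String × List String) (line0 : String) :
    PySem.Dict String String × Option String × List String :=
  let line := PySem.Str.rstrip line0
  if pvIsHdr line then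
    (pvFlushA st.1 st.2.1 st.2.2, some (pvName line), [])
  else
    (st.1, st.2.1, st.2.2 ++ [line])

def parse_agent_diff (agent_response : String) : List (String × String) :=
  let st := (PySem.Str.splitlines agent_response).foldl pvStepA (PySem.Dict.empty, none, [])
  (pvFlushA st.1 st.2.1 st.2.2).items

-- ===== PORT B =====
def pvPick (p : Int × String) : Option (Int × String) :=
  if pvIsHdr p.2 then some (p.1, pvName p.2) else none

def pvStepB (lines : List String) (files : PySem.Dict String String)
    (p : (Int × String) × Int) : PySem.Dict String String :=
  if p.1.2 ≠ "" then
    files.insert p.1.2 (PySem.Str.strip (PySem.Str.join "\n"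
      (PySem.List.slice lines (some (p.1.1 + 1)) (some p.2))))
  else files

def parse_agent_diff_alt (agent_response : String) : List (String × String) :=
  let lines := (PySem.Str.splitlines agent_response).map PySem.Str.rstrip
  let headers := (PySem.List.enumerate lines).filterMap pvPick
  let bounds := (headers.map (·.1)).drop 1 ++ [(lines.length : Int)]
  let files := (headers.zip bounds).foldl (pvStepB lines) PySem.Dict.empty
  files.items

-- ===== PRECONDITION & SPEC =====
def Spec_parse_agent_diff (agent_response : String) (out : List (String × String)) : Prop := out = parse_agent_diff_alt agent_response
instance (agent_response : String) (out : List (String × String)) : Decidable (Spec_parse_agent_diff agent_response out) := by unfold Spec_parse_agent_diff; infer_instance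

-- ===== CLAIM (what is proved, stated in full; the proofs are below) =====
def Claim_equal_parse_agent_diff : Prop := ∀ (agent_response : String), Dom_parse_agent_diff agent_response → Spec_parse_agent_diff agent_response (parse_agent_diff agent_response)

-- ===== LEMMAS AND PROOFS =====

-- common characterization: split the (rstripped) lines into the preamble and the (name, body) sections
def pvSecs : List String → List String × List (String × List String)
  | [] => ([], [])
  | l :: ls =>
    let r := pvSecs ls
    if pvIsHdr l then ([], (pvName l, r.1) :: r.2) else (l :: r.1, r.2)

def pvFoldSecs (d : PySem.Dict String String) (secs : List (String × List String)) :
    PySem.Dict String String :=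
  secs.foldl (fun d p => pvFlushNamed d p.1 p.2) d

-- A's step with the rstrip already applied
def pvStepA' (st : PySem.Dict String String × Option String × List String) (line : String) :
    PySem.Dict String String × Option String × List String :=
  if pvIsHdr line then
    (pvFlushA st.1 st.2.1 st.2.2, some (pvName line), [])
  else
    (st.1, st.2.1, st.2.2 ++ [line])

theorem pvA_char (L : List String) (files : PySem.Dict String String) (cur : Option String)
    (buf : List String) :
    (fun st => pvFlushA st.1 st.2.1 st.2.2) (L.foldl pvStepA' (files, cur, buf))
      = pvFoldSecs (pvFlushA files cur (buf ++ (pvSecs L).1)) (pvSecs L).2 := by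
  induction L generalizing files cur buf with
  | nil => simp [pvSecs, pvFoldSecs]
  | cons l ls ih =>
    by_cases h : pvIsHdr l = true
    · simp only [List.foldl_cons, pvStepA', h, if_pos, pvSecs, ih]
      simp [pvFoldSecs, pvFlushA]
    · simp only [List.foldl_cons, pvStepA', h, pvSecs, ih]
      simp [pvFoldSecs]

def pvH (L : List String) : List (Int × String) :=
  (PySem.List.enumerate L).filterMap pvPick

def pvShift (p : Int × String) : Int × String := (p.1 + 1, p.2)

def pvBFold (L : List String) (hs : List (Int × String)) (d : PySem.Dict String String) :
    PySem.Dict String String :=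
  (hs.zip ((hs.map (·.1)).drop 1 ++ [(L.length : Int)])).foldl (pvStepB L) d

theorem pvPick_shift (p : Int × String) :
    pvPick (pvShift p) = (pvPick p).map pvShift := by
  unfold pvPick pvShift
  by_cases h : pvIsHdr p.2 <;> simp [h]

theorem pvH_shift (ls : List String) (s : Int) :
    (PySem.List.enumerate ls (s + 1)).filterMap pvPick
      = ((PySem.List.enumerate ls s).filterMap pvPick).map pvShift := by
  induction ls generalizing s with
  | nil => simp [PySem.List.enumerate_nil]
  | cons a as ih =>
    simp only [PySem.List.enumerate_cons, List.filterMap_cons, ih]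
    have : pvPick (s + 1, a) = (pvPick (s, a)).map pvShift := pvPick_shift (s, a)
    cases hp : pvPick (s, a) <;> simp [this, hp]

theorem pvH_cons (l : String) (ls : List String) :
    pvH (l :: ls) = (if pvIsHdr l then [(0, pvName l)] else []) ++ (pvH ls).map pvShift := by
  unfold pvH
  rw [show PySem.List.enumerate (l :: ls) = (0, l) :: PySem.List.enumerate ls (0 + 1) from
    PySem.List.enumerate_cons l ls 0]
  simp only [List.filterMap_cons, pvH_shift]
  by_cases h : pvIsHdr l <;> simp [pvPick, h]

theorem pvH_nonneg (L : List String) (p : Int × String) (hp : p ∈ pvH L) : 0 ≤ p.1 := by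
  unfold pvH at hp
  obtain ⟨q, hq, hpick⟩ := List.mem_filterMap.1 hp
  obtain ⟨k, hk, rfl⟩ := (PySem.List.mem_enumerate_iff L 0 q).1 hq
  simp only [pvPick] at hpick
  split_ifs at hpick with h
  obtain rfl := Option.some_injective _ hpick
  simp


theorem pvSlice_shift (l : String) (ls : List String) (i e : Int) (hi : 0 ≤ i) (he : 0 ≤ e) :
    PySem.List.slice (l :: ls) (some (i + 1 + 1)) (some (e + 1))
      = PySem.List.slice ls (some (i + 1)) (some e) := by
  rw [PySem.List.slice_toNat _ (by omega) (by omega),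
      PySem.List.slice_toNat _ (by omega) he]
  have h1 : (i + 1 + 1).toNat = (i + 1).toNat + 1 := by omega
  have h2 : (e + 1).toNat - (i + 1 + 1).toNat = e.toNat - (i + 1).toNat := by omega
  rw [h2, h1, List.drop_succ_cons]

theorem pvBFold_shift (l : String) (ls : List String) (hs : List (Int × String))
    (d : PySem.Dict String String) (hnn : ∀ p ∈ hs, 0 ≤ p.1) :
    pvBFold (l :: ls) (hs.map pvShift) d = pvBFold ls hs d := by
  unfold pvBFold
  have hmap : (hs.map pvShift).map (·.1) = (hs.map (·.1)).map (· + 1) := by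
    simp [pvShift]
  have hb : ((hs.map pvShift).map (·.1)).drop 1 ++ [((l :: ls).length : Int)]
      = ((hs.map (·.1)).drop 1 ++ [(ls.length : Int)]).map (· + 1) := by
    rw [hmap, List.map_append]
    simp [← List.map_drop]
  rw [hb, List.zip_map, List.foldl_map]
  refine PySem.List.foldl_congr_mem _ _ _ _ (fun acc x hx => ?_)
  obtain ⟨hx1, hx2⟩ := List.of_mem_zip (show (x.1, x.2) ∈ _ from hx)
  have hnn1 : 0 ≤ x.1.1 := hnn _ hx1
  have hnn2 : 0 ≤ x.2 := by
    rcases List.mem_append.1 hx2 with h | h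
    · have := List.mem_of_mem_drop h
      obtain ⟨q, hq, heq⟩ := List.mem_map.1 this
      exact heq ▸ hnn _ hq
    · simp at h
      omega
  show pvStepB (l :: ls) acc (pvShift x.1, x.2 + 1) = pvStepB ls acc x
  unfold pvStepB pvShift
  by_cases hn : x.1.2 = "" <;> simp [hn]
  rw [pvSlice_shift l ls x.1.1 x.2 hnn1 hnn2]

theorem pvSecs_noHdr (ls : List String) (h : pvH ls = []) : pvSecs ls = (ls, []) := by
  induction ls with
  | nil => simp [pvSecs]
  | cons a as ih =>
    rw [pvH_cons] at h
    by_cases ha : pvIsHdr a = true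
    · simp [ha] at h
    · simp only [ha, Bool.false_eq_true, ite_false, List.nil_append,
        List.map_eq_nil_iff] at h
      simp [pvSecs, ha, ih h]

theorem pvSecs_pre (ls : List String) (q : Int × String) (t : List (Int × String))
    (h : pvH ls = q :: t) : (pvSecs ls).1 = ls.take q.1.toNat := by
  induction ls generalizing q t with
  | nil => simp [pvH, PySem.List.enumerate_nil] at h
  | cons a as ih =>
    rw [pvH_cons] at h
    by_cases ha : pvIsHdr a = true
    · simp only [ha, ite_true] at h
      obtain ⟨rfl, -⟩ : (0, pvName a) = q ∧ _ := by
        simpa using List.cons_eq_cons.1 (by simpa using h)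
      simp [pvSecs, ha]
    · simp only [ha, Bool.false_eq_true, ite_false, List.nil_append] at h
      cases hH : pvH as with
      | nil => rw [hH] at h; simp at h
      | cons q' t' =>
        rw [hH] at h
        simp only [List.map_cons] at h
        obtain ⟨hq, -⟩ := List.cons_eq_cons.1 h
        have hq'nn : 0 ≤ q'.1 := pvH_nonneg as q' (by simp [hH])
        have : q.1.toNat = q'.1.toNat + 1 := by
          rw [← hq]; unfold pvShift; omega
        rw [this]
        simp [pvSecs, ha, ih q' t' hH]

theorem pvBFold_cons (L : List String) (n : String) (q : Int × String)
    (t : List (Int × String)) (d : PySem.Dict String String) :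
    pvBFold L ((0, n) :: (q :: t).map pvShift) d
      = pvBFold L ((q :: t).map pvShift) (pvStepB L d ((0, n), q.1 + 1)) := by
  unfold pvBFold pvShift
  simp

theorem pvB_char (L : List String) (d : PySem.Dict String String) :
    pvBFold L (pvH L) d = pvFoldSecs d (pvSecs L).2 := by
  induction L generalizing d with
  | nil =>
    unfold pvBFold pvH pvSecs pvFoldSecs
    simp [PySem.List.enumerate_nil]
  | cons l ls ih =>
    have hnn : ∀ p ∈ pvH ls, 0 ≤ p.1 := fun p hp => pvH_nonneg ls p hp
    rw [pvH_cons]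
    by_cases h : pvIsHdr l = true
    · simp only [h, ite_true, List.singleton_append]
      cases hH : pvH ls with
      | nil =>
        simp only [List.map_nil]
        have hsecs : pvSecs (l :: ls) = ([], [(pvName l, ls)]) := by
          simp [pvSecs, h, pvSecs_noHdr ls hH]
        rw [hsecs]
        unfold pvBFold
        simp only [List.map_cons, List.map_nil, List.drop_succ_cons, List.drop_nil,
          List.nil_append, List.zip_cons_cons, List.zip_nil_right, List.foldl_cons,
          List.foldl_nil]
        have hslice : PySem.List.slice (l :: ls) (some ((0 : Int) + 1))
            (some ((l :: ls).length : Int)) = ls := by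
          rw [PySem.List.slice_toNat _ (by omega) (by positivity)]
          simp
        simp only [pvFoldSecs, List.foldl_cons, List.foldl_nil, pvStepB, pvFlushNamed, hslice]
        by_cases hn : pvName l = "" <;> simp [hn]
      | cons q t =>
        have hq : 0 ≤ q.1 := hnn q (by simp [hH])
        rw [pvBFold_cons, pvBFold_shift l ls _ _ (hH ▸ hnn), ← hH, ih]
        have hsecs : pvSecs (l :: ls) = ([], (pvName l, (pvSecs ls).1) :: (pvSecs ls).2) := by
          simp [pvSecs, h]
        rw [hsecs]
        have hslice : PySem.List.slice (l :: ls) (some (1 : Int)) (some (q.1 + 1))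
            = ls.take q.1.toNat := by
          rw [PySem.List.slice_toNat _ (by omega) (by omega)]
          have harith : (q.1 + 1).toNat - 1 = q.1.toNat := by omega
          simp [harith]
        have hstep : pvStepB (l :: ls) d ((0, pvName l), q.1 + 1)
            = pvFlushNamed d (pvName l) (pvSecs ls).1 := by
          rw [pvSecs_pre ls q t hH]
          unfold pvStepB pvFlushNamed
          by_cases hn : pvName l = "" <;> simp [hn, hslice]
        rw [hstep]
        simp only [pvFoldSecs, List.foldl_cons]
    · simp only [h, Bool.false_eq_true, ite_false, List.nil_append]
      rw [pvBFold_shift l ls _ d hnn, ih d]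
      simp [pvSecs, h]

-- ===== VERDICT (by name: the statement is the Claim_ definition above) =====
theorem pvMain_eq (s : String) :
    (fun st => pvFlushA st.1 st.2.1 st.2.2)
        ((PySem.Str.splitlines s).foldl pvStepA (PySem.Dict.empty, none, []))
      = pvBFold ((PySem.Str.splitlines s).map PySem.Str.rstrip)
          (pvH ((PySem.Str.splitlines s).map PySem.Str.rstrip)) PySem.Dict.empty := by
  have hA : (PySem.Str.splitlines s).foldl pvStepA (PySem.Dict.empty, none, [])
      = ((PySem.Str.splitlines s).map PySem.Str.rstrip).foldl pvStepA'
          (PySem.Dict.empty, none, []) := by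
    rw [List.foldl_map]
    congr 1
  rw [hA, pvA_char, pvB_char]
  rfl

theorem parse_agent_diff_spec : Claim_equal_parse_agent_diff := by
  intro s _
  exact congrArg PySem.Dict.items (pvMain_eq s)
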